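-- pv_equiv track=rewrite | github.com/ASSmirnov/test_for_wg | main.py | is_string_reducible
-- ===== SOURCE A (Python) =====
-- from itertools import groupby
--
-- def is_string_reducible(source):
--     tokens = [''.join(g) for _, g in groupby(source)]
--     for i in range(len(tokens)):
--         if len(tokens[i]) > 1:
--             reduced_source = ''.join([x for j, x in enumerate(tokens) if j != i])
--             if not reduced_source or is_string_reducible(reduced_source):
--                 return True
--     return False
-- ===== SOURCE B (Python) =====
-- def is_string_reducible(source):
--     # Iterative breadth-first search over run-length-encoded states with
--     # per-level deduplication: each distinct intermediate state is expanded
--     # once per level, instead of A's recursive DFS re-deriving and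
--     # re-exploring equal substates along every path.
--     frontier = [_rle(source)]
--     while frontier:
--         nxt = []
--         seen = set()
--         for state in frontier:
--             for succ in _succs(state):
--                 if not succ:
--                     return True
--                 if succ not in seen:
--                     seen.add(succ)
--                     nxt.append(succ)
--         frontier = nxt
--     return False
--
-- def _rle(s):
--     runs = []
--     for ch in s:
--         if runs and runs[-1][0] == ch:
--             runs[-1] = (ch, runs[-1][1] + 1)
--         else:
--             runs.append((ch, 1))
--     return tuple(runs)
--
-- def _succs(state):
--     out = []
--     pre = ()
--     rest = state
--     while rest:
--         (ch, count), post = rest[0], rest[1:]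
--         if count >= 2:
--             if pre and post and pre[-1][0] == post[0][0]:
--                 out.append(pre[:-1] + ((pre[-1][0], pre[-1][1] + post[0][1]),) + post[1:])
--             else:
--                 out.append(pre + post)
--         pre = pre + ((ch, count),)
--         rest = post
--     return out
-- ===== Notes on version B (the rewrite author's own statement) =====
-- stated objective: alternative
-- what changed: B does an iterative breadth-first search over run-length-encoded (char, count) states with a per-level seen-set that deduplicates identical intermediate states before they are expanded, instead of A's recursive depth-first backtracking over raw strings that regroups with groupby and re-explores equal substates along every path.
import Mathlib
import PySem

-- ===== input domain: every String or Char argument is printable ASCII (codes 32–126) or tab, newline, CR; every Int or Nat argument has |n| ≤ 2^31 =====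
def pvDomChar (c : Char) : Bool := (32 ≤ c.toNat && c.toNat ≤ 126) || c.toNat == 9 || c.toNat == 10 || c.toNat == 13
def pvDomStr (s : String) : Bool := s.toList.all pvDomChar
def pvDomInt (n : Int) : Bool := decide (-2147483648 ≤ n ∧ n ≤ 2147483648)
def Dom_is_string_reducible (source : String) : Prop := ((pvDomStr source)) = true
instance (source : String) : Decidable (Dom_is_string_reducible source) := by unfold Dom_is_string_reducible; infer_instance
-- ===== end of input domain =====

-- B replaces A's recursive depth-first search over raw strings (regrouping at every
-- node) by an iterative level-by-level breadth-first search over run-length-encoded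
-- states with per-level set deduplication (objective: alternative).

-- ===== PORT A =====
-- itertools.groupby over the characters: maximal runs of equal characters, as lists.
def pvTokenize : List Char → List (List Char)
  | [] => []
  | c :: cs =>
    match pvTokenize cs with
    | [] => [[c]]
    | g :: gs => if g.head? = some c then (c :: g) :: gs else [c] :: g :: gs

-- A's 'for i in range(len(tokens))' loop as a zipper: done = tokens[:i], todo = tokens[i:];
-- f is the recursive call (fuel-guarded below).
def pvALoop (f : List Char → Bool) (done todo : List (List Char)) : Bool :=
  match todo with
  | [] => false
  | t :: rest =>
    (decide (1 < t.length) &&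
      (let r := (done ++ rest).flatten; (r.isEmpty || f r))) ||
    pvALoop f (done ++ [t]) rest

-- Fuel makes A's recursion structural; fuel = length of the string suffices, since each
-- recursive call removes a run of length ≥ 2.
def pvAGo : Nat → List Char → Bool
  | 0, _ => false
  | n + 1, l => pvALoop (pvAGo n) [] (pvTokenize l)

def is_string_reducible (source : String) : Bool :=
  pvAGo source.toList.length source.toList

-- ===== PORT B =====
-- _rle: left-to-right loop appending runs, bumping the count of the last run.
def pvRleF (runs : List (Char × Nat)) : List Char → List (Char × Nat)
  | [] => runs
  | c :: cs =>
    match runs.getLast? with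
    | some (d, k) =>
      if d = c then pvRleF (runs.dropLast ++ [(c, k + 1)]) cs
      else pvRleF (runs ++ [(c, 1)]) cs
    | none => pvRleF [(c, 1)] cs

-- _succs: the while loop over (pre, rest) zipper, accumulating successor states.
def pvSuccsGo (out : List (List (Char × Nat))) (pre : List (Char × Nat)) :
    List (Char × Nat) → List (List (Char × Nat))
  | [] => out
  | (ch, k) :: post =>
    let out' :=
      if 2 ≤ k then
        out ++ [match pre.getLast?, post.head? with
                | some (d, k1), some (e, k2) =>
                  if d = e then pre.dropLast ++ (d, k1 + k2) :: post.tail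
                  else pre ++ post
                | _, _ => pre ++ post]
      else out
    pvSuccsGo out' (pre ++ [(ch, k)]) post

def pvSuccs (state : List (Char × Nat)) : List (List (Char × Nat)) :=
  pvSuccsGo [] [] state

-- inner 'for succ in _succs(state)' loop: none = 'return True' taken.
def pvScan (sucs : List (List (Char × Nat))) (nxt : List (List (Char × Nat)))
    (seen : PySem.Set (List (Char × Nat))) :
    Option (List (List (Char × Nat)) × PySem.Set (List (Char × Nat))) :=
  match sucs with
  | [] => some (nxt, seen)
  | su :: rest =>
    if su = [] then none
    else if PySem.Set.contains seen su then pvScan rest nxt seen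
    else pvScan rest (nxt ++ [su]) (PySem.Set.add seen su)

-- outer 'for state in frontier' loop of one while-iteration.
def pvLevel (frontier nxt : List (List (Char × Nat)))
    (seen : PySem.Set (List (Char × Nat))) :
    Option (List (List (Char × Nat)) × PySem.Set (List (Char × Nat))) :=
  match frontier with
  | [] => some (nxt, seen)
  | st :: rest =>
    match pvScan (pvSuccs st) nxt seen with
    | none => none
    | some (nxt', seen') => pvLevel rest nxt' seen'

-- the while loop, fuel-guarded (fuel = |source| + 1 bounds the number of levels,
-- since every successor has strictly fewer runs).
def pvBfs : Nat → List (List (Char × Nat)) → Bool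
  | _, [] => false
  | 0, _ => false
  | n + 1, fr =>
    match pvLevel fr [] PySem.Set.empty with
    | none => true
    | some (nxt, _) => pvBfs n nxt

def is_string_reducible_alt (source : String) : Bool :=
  pvBfs (source.toList.length + 1) [pvRleF [] source.toList]

-- ===== PRECONDITION & SPEC =====
def Spec_is_string_reducible (source : String) (out : Bool) : Prop := out = is_string_reducible_alt source
instance (source : String) (out : Bool) : Decidable (Spec_is_string_reducible source out) := by unfold Spec_is_string_reducible; infer_instance

-- ===== CLAIM (what is proved, stated in full; the proofs are below) =====
def Claim_equal_is_string_reducible : Prop := ∀ (source : String), Dom_is_string_reducible source → Spec_is_string_reducible source (is_string_reducible source)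

-- ===== LEMMAS AND PROOFS =====

-- proof-layer right-to-left run-length encoding (cons-structured, convenient to induct on)
def pvRle : List Char → List (Char × Nat)
  | [] => []
  | c :: cs =>
    match pvRle cs with
    | (d, k) :: rest => if d = c then (c, k + 1) :: rest else (c, 1) :: (d, k) :: rest
    | [] => [(c, 1)]

-- proof-layer token-level search mirroring A's recursion (intermediate between A and BFS)
def pvBLoop (f : List (Char × Nat) → Bool) (done todo : List (Char × Nat)) : Bool :=
  match todo with
  | [] => false
  | (ch, c) :: rest =>
    (decide (2 ≤ c) &&
      (let r :=
        match done.getLast?, rest.head? with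
        | some (d, k1), some (e, k2) =>
          if d = e then done.dropLast ++ (d, k1 + k2) :: rest.tail
          else done ++ rest
        | _, _ => done ++ rest
      r.isEmpty || f r)) ||
    pvBLoop f (done ++ [(ch, c)]) rest

def pvBGo : Nat → List (Char × Nat) → Bool
  | 0, _ => false
  | n + 1, toks => pvBLoop (pvBGo n) [] toks

-- pvEp expands one run pair back to its characters; pvExpand a whole token list.
def pvEp (p : Char × Nat) : List Char := List.replicate p.2 p.1

def pvExpand (ps : List (Char × Nat)) : List Char := (ps.map pvEp).flatten

@[simp] lemma pvExpand_nil : pvExpand [] = [] := rfl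

@[simp] lemma pvExpand_cons (p : Char × Nat) (ps : List (Char × Nat)) :
    pvExpand (p :: ps) = List.replicate p.2 p.1 ++ pvExpand ps := rfl

@[simp] lemma pvExpand_append (xs ys : List (Char × Nat)) :
    pvExpand (xs ++ ys) = pvExpand xs ++ pvExpand ys := by
  simp [pvExpand]

lemma pvExpand_eq_nil (ps : List (Char × Nat)) (h : ∀ p ∈ ps, 1 ≤ p.2) :
    pvExpand ps = [] ↔ ps = [] := by
  cases ps with
  | nil => simp
  | cons p ps =>
    have : 1 ≤ p.2 := h p (by simp)
    constructor
    · intro hx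
      simp at hx
      omega
    · intro hx
      exact absurd hx (by simp)

-- the four basic facts about pvRle, proved in one induction
lemma rle_props : ∀ l : List Char,
    pvTokenize l = (pvRle l).map pvEp ∧
    (∀ p ∈ pvRle l, 1 ≤ p.2) ∧
    List.IsChain (fun p q : Char × Nat => p.1 ≠ q.1) (pvRle l) ∧
    pvExpand (pvRle l) = l := by
  intro l
  induction l with
  | nil => simp [pvTokenize, pvRle]
  | cons c cs ih =>
    obtain ⟨h1, h2, h3, h4⟩ := ih
    rcases hr : pvRle cs with _ | ⟨⟨d, k⟩, ps⟩
    · have hcs : cs = [] := by simpa [hr] using h4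
      subst hcs
      refine ⟨by simp [pvTokenize, pvRle, pvEp], by simp [pvRle], by simp [pvRle], by simp [pvRle, pvEp, pvExpand]⟩
    · have hk : 1 ≤ k := by
        have := h2 (d, k) (by rw [hr]; simp)
        simpa using this
      have hhead : (List.replicate k d).head? = some d := by
        cases k with
        | zero => omega
        | succ m => simp [List.replicate_succ]
      rw [hr] at h2 h3 h4
      by_cases hdc : d = c
      · subst hdc
        have hstep : pvRle (d :: cs) = (d, k + 1) :: ps := by simp [pvRle, hr]
        refine ⟨?_, ?_, ?_, ?_⟩
        · rw [pvTokenize, h1, hr, hstep]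
          simp [pvEp, hhead, List.replicate_succ]
        · intro p hp
          rw [hstep] at hp
          simp at hp
          rcases hp with h | h
          · subst h; simp
          · exact h2 p (by simp [h])
        · rw [hstep]
          have h3' := List.isChain_cons.mp h3
          exact List.isChain_cons.mpr ⟨h3'.1, h3'.2⟩
        · rw [hstep]
          simp only [pvExpand_cons, List.replicate_succ, List.cons_append]
          have h4' : List.replicate k d ++ pvExpand ps = cs := by simpa using h4
          rw [h4']
      · have hstep : pvRle (c :: cs) = (c, 1) :: (d, k) :: ps := by simp [pvRle, hr, hdc]
        refine ⟨?_, ?_, ?_, ?_⟩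
        · rw [pvTokenize, h1, hr, hstep]
          simp [pvEp, hhead, hdc]
        · intro p hp
          rw [hstep] at hp
          simp at hp
          rcases hp with h | h | h
          · subst h; simp
          · subst h; exact hk
          · exact h2 p (by simp [h])
        · rw [hstep]
          exact List.isChain_cons_cons.mpr ⟨fun h => hdc h.symm, h3⟩
        · rw [hstep]
          simp only [pvExpand_cons]
          have h4' : List.replicate k d ++ pvExpand ps = cs := by simpa using h4
          simp [h4']

lemma rle_replicate_append (c : Char) (t : List Char) : ∀ k, 1 ≤ k →
    pvRle (List.replicate k c ++ t) =
      (match pvRle t with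
       | (d, m) :: r => if d = c then (c, m + k) :: r else (c, k) :: (d, m) :: r
       | [] => [(c, k)]) := by
  intro k
  induction k with
  | zero => omega
  | succ k ih =>
    intro _
    by_cases hk : 1 ≤ k
    · have hrec := ih hk
      have hsplit : List.replicate (k + 1) c ++ t = c :: (List.replicate k c ++ t) := by
        simp [List.replicate_succ]
      rw [hsplit, pvRle, hrec]
      cases ht : pvRle t with
      | nil => simp
      | cons p r =>
        obtain ⟨d, m⟩ := p
        by_cases hdc : d = c <;> simp [hdc, Nat.add_assoc]
    · have hk0 : k = 0 := by omega
      subst hk0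
      cases ht : pvRle t with
      | nil => simp [List.replicate_succ, pvRle, ht]
      | cons p r =>
        obtain ⟨d, m⟩ := p
        by_cases hdc : d = c <;> simp [List.replicate_succ, pvRle, ht, hdc]

-- a well-formed token list is recovered exactly by pvRle from its expansion
lemma rle_expand (ps : List (Char × Nat))
    (h1 : ∀ p ∈ ps, 1 ≤ p.2)
    (h2 : List.IsChain (fun p q : Char × Nat => p.1 ≠ q.1) ps) :
    pvRle (pvExpand ps) = ps := by
  induction ps with
  | nil => rfl
  | cons p ps ih =>
    obtain ⟨c, k⟩ := p
    have hk : 1 ≤ k := by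
      have := h1 (c, k) (by simp); simpa using this
    have ihp : pvRle (pvExpand ps) = ps :=
      ih (fun q hq => h1 q (by simp [hq])) (List.isChain_cons.mp h2).2
    rw [pvExpand_cons, rle_replicate_append c (pvExpand ps) k hk, ihp]
    cases ps with
    | nil => simp
    | cons q qs =>
      obtain ⟨d, m⟩ := q
      have hdc : ¬ (d = c) := by
        have := (List.isChain_cons_cons.mp h2).1
        exact fun h => this h.symm
      simp [hdc]

-- shared tail of each branch of the loop equivalence: once the merged token list M
-- is known to expand to A's reduced string, the two guarded subcalls agree
lemma inner_eq (n : Nat)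
    (IH : ∀ l : List Char, l.length ≤ n → pvAGo n l = pvBGo n (pvRle l))
    (M done rest : List (Char × Nat))
    (hexp : pvExpand M = pvExpand (done ++ rest))
    (hcnt : ∀ p ∈ M, 1 ≤ p.2)
    (hch : List.IsChain (fun p q : Char × Nat => p.1 ≠ q.1) M)
    (hlen : (pvExpand (done ++ rest)).length ≤ n) :
    ((pvExpand (done ++ rest)).isEmpty || pvAGo n (pvExpand (done ++ rest)))
      = (M.isEmpty || pvBGo n M) := by
  have hrle : pvRle (pvExpand (done ++ rest)) = M := by
    rw [← hexp]; exact rle_expand M hcnt hch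
  have hiff : pvExpand (done ++ rest) = [] ↔ M = [] := by
    rw [← hexp]; exact pvExpand_eq_nil M hcnt
  have hemp : (pvExpand (done ++ rest)).isEmpty = M.isEmpty := by
    rcases hM : M with _ | ⟨q, M'⟩
    · simp [hiff.mpr hM]
    · have hne : pvExpand (done ++ rest) ≠ [] := by
        intro h
        have h2 := hiff.mp h
        rw [hM] at h2
        simp at h2
      rcases hE : pvExpand (done ++ rest) with _ | ⟨a, t⟩
      · exact absurd hE hne
      · simp
  rw [hemp, IH _ hlen, hrle]

lemma loop_eq (n : Nat)
    (IH : ∀ l : List Char, l.length ≤ n → pvAGo n l = pvBGo n (pvRle l)) :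
    ∀ (todo done : List (Char × Nat)),
      (∀ p ∈ done ++ todo, 1 ≤ p.2) →
      List.IsChain (fun p q : Char × Nat => p.1 ≠ q.1) (done ++ todo) →
      (pvExpand (done ++ todo)).length ≤ n + 1 →
      pvALoop (pvAGo n) (done.map pvEp) (todo.map pvEp) = pvBLoop (pvBGo n) done todo := by
  intro todo
  induction todo with
  | nil =>
    intro done _ _ _
    simp [pvALoop, pvBLoop]
  | cons p rest ihrest =>
    obtain ⟨c, k⟩ := p
    intro done hcnt hch hlen
    have hassoc : (done ++ [(c, k)]) ++ rest = done ++ (c, k) :: rest := by simp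
    have hcont : pvALoop (pvAGo n) (List.map pvEp done ++ [pvEp (c, k)]) (List.map pvEp rest)
        = pvBLoop (pvBGo n) (done ++ [(c, k)]) rest := by
      have h := ihrest (done ++ [(c, k)]) (by rw [hassoc]; exact hcnt)
        (by rw [hassoc]; exact hch) (by rw [hassoc]; exact hlen)
      simpa using h
    have hflat : (List.map pvEp done ++ List.map pvEp rest).flatten = pvExpand (done ++ rest) := by
      simp [pvExpand]
    have hdec : decide (1 < (pvEp (c, k)).length) = decide (2 ≤ k) := by
      apply decide_eq_decide.mpr
      simp [pvEp]
      omega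
    simp only [List.map_cons, pvALoop, pvBLoop]
    rw [hcont, hflat, hdec]
    by_cases hk2 : 2 ≤ k
    · simp only [hk2, decide_true, Bool.true_and]
      have hlen' : (pvExpand (done ++ rest)).length ≤ n := by
        have e1 : pvExpand (done ++ (c, k) :: rest)
            = pvExpand done ++ (List.replicate k c ++ pvExpand rest) := by simp
        have e2 : pvExpand (done ++ rest) = pvExpand done ++ pvExpand rest := by simp
        rw [e1] at hlen
        rw [e2]
        simp only [List.length_append, List.length_replicate] at hlen ⊢
        omega
      congr 1
      rcases List.eq_nil_or_concat done with hd | ⟨ds, ⟨d, k1⟩, hd⟩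
      · subst hd
        have hin := inner_eq n IH rest [] rest rfl
          (fun p hp => hcnt p (by simp [hp]))
          ((List.isChain_cons.mp (by simpa using hch)).2)
          (by simpa using hlen')
        exact hin
      · simp only [List.concat_eq_append] at hd
        subst hd
        rcases rest with _ | ⟨⟨e, k2⟩, rest'⟩
        · have hA : List.IsChain (fun p q : Char × Nat => p.1 ≠ q.1) (ds ++ [(d, k1)]) :=
            (List.isChain_append.mp hch).1
          have hin := inner_eq n IH (ds ++ [(d, k1)]) (ds ++ [(d, k1)]) [] (by simp)
            (fun p hp => hcnt p (by simp at hp ⊢; tauto)) hA (by simpa using hlen')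
          rw [List.getLast?_concat]
          simpa using hin
        · obtain ⟨hA, hB, hAB⟩ := List.isChain_append.mp hch
          have hEchain : List.IsChain (fun p q : Char × Nat => p.1 ≠ q.1) ((e, k2) :: rest') :=
            (List.isChain_cons.mp hB).2
          by_cases hde : d = e
          · subst hde
            have hcntM : ∀ p ∈ ds ++ (d, k1 + k2) :: rest', 1 ≤ p.2 := by
              intro p hp
              simp at hp
              rcases hp with h | h | h
              · exact hcnt p (by simp <;> tauto)
              · have hk1 : 1 ≤ k1 := by simpa using hcnt (d, k1) (by simp)
                subst h
                simp
                omega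
              · exact hcnt p (by simp <;> tauto)
            have hchM : List.IsChain (fun p q : Char × Nat => p.1 ≠ q.1)
                (ds ++ (d, k1 + k2) :: rest') := by
              obtain ⟨hds, _, hj⟩ := List.isChain_append.mp hA
              refine List.isChain_append.mpr ⟨hds, ?_, ?_⟩
              · refine List.isChain_cons.mpr ⟨?_, (List.isChain_cons.mp hEchain).2⟩
                exact fun y hy => (List.isChain_cons.mp hEchain).1 y hy
              · intro x hx y hy
                simp at hy
                subst hy
                exact hj x hx (d, k1) (by simp)
            have hexpM : pvExpand (ds ++ (d, k1 + k2) :: rest')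
                = pvExpand ((ds ++ [(d, k1)]) ++ (d, k2) :: rest') := by
              simp only [pvExpand_append, pvExpand_cons, pvExpand_nil, List.replicate_add,
                List.append_assoc, List.append_nil]
            have hin := inner_eq n IH (ds ++ (d, k1 + k2) :: rest') (ds ++ [(d, k1)])
              ((d, k2) :: rest') hexpM hcntM hchM hlen'
            rw [List.getLast?_concat]
            simp only [List.head?_cons, List.dropLast_concat, List.tail_cons]
            rw [if_pos trivial]
            exact hin
          · have hcntM : ∀ p ∈ (ds ++ [(d, k1)]) ++ (e, k2) :: rest', 1 ≤ p.2 := by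
              intro p hp
              simp at hp
              rcases hp with h | h | h
              · exact hcnt p (by simp <;> tauto)
              · exact hcnt p (by simp <;> tauto)
              · exact hcnt p (by simp <;> tauto)
            have hchM : List.IsChain (fun p q : Char × Nat => p.1 ≠ q.1)
                ((ds ++ [(d, k1)]) ++ (e, k2) :: rest') := by
              refine List.isChain_append.mpr ⟨hA, hEchain, ?_⟩
              intro x hx y hy
              rw [List.getLast?_concat] at hx
              simp at hx hy
              subst hx
              subst hy
              exact hde
            have hin := inner_eq n IH ((ds ++ [(d, k1)]) ++ (e, k2) :: rest')
              (ds ++ [(d, k1)]) ((e, k2) :: rest') rfl hcntM hchM hlen'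
            rw [List.getLast?_concat]
            simp only [List.head?_cons, List.dropLast_concat, List.tail_cons]
            rw [if_neg hde]
            exact hin
    · simp [hk2]

lemma go_eq : ∀ n (l : List Char), l.length ≤ n → pvAGo n l = pvBGo n (pvRle l) := by
  intro n
  induction n with
  | zero => intro l _; rfl
  | succ n ih =>
    intro l hl
    obtain ⟨h1, h2, h3, h4⟩ := rle_props l
    show pvALoop (pvAGo n) [] (pvTokenize l) = pvBLoop (pvBGo n) [] (pvRle l)
    rw [h1]
    have := loop_eq n ih (pvRle l) [] (by simpa using h2) (by simpa using h3)
      (by simp only [List.nil_append, h4]; exact hl)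
    simpa using this

-- ====== B-side lemmas ======

-- depth-bounded reachability of the empty state through pvSuccs
def goodN : Nat → List (Char × Nat) → Bool
  | 0, _ => false
  | n + 1, T => (pvSuccs T).any (fun su => su.isEmpty || goodN n su)

-- pvRleF computes a well-formed encoding whose expansion is the input
lemma rleF_props : ∀ (l : List Char) (acc : List (Char × Nat)),
    (∀ p ∈ acc, 1 ≤ p.2) →
    List.IsChain (fun p q : Char × Nat => p.1 ≠ q.1) acc →
    (∀ p ∈ pvRleF acc l, 1 ≤ p.2) ∧
    List.IsChain (fun p q : Char × Nat => p.1 ≠ q.1) (pvRleF acc l) ∧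
    pvExpand (pvRleF acc l) = pvExpand acc ++ l := by
  intro l
  induction l with
  | nil => intro acc h1 h2; exact ⟨h1, h2, by simp [pvRleF]⟩
  | cons c cs ih =>
    intro acc h1 h2
    rcases List.eq_nil_or_concat acc with rfl | ⟨ds, ⟨d, k⟩, hcat⟩
    · have hstep : pvRleF ([] : List (Char × Nat)) (c :: cs) = pvRleF [(c, 1)] cs := rfl
      rw [hstep]
      obtain ⟨g1, g2, g3⟩ := ih [(c, 1)] (by simp) (by simp)
      exact ⟨g1, g2, by rw [g3]; simp [pvExpand, pvEp]⟩
    · rw [List.concat_eq_append] at hcat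
      subst hcat
      have hlast : (ds ++ [(d, k)]).getLast? = some (d, k) := List.getLast?_concat
      by_cases hdc : d = c
      · subst hdc
        have hstep : pvRleF (ds ++ [(d, k)]) (d :: cs)
            = pvRleF (ds ++ [(d, k + 1)]) cs := by
          show (match (ds ++ [(d, k)]).getLast? with
                | some (e, m) =>
                  if e = d then pvRleF ((ds ++ [(d, k)]).dropLast ++ [(d, m + 1)]) cs
                  else pvRleF ((ds ++ [(d, k)]) ++ [(d, 1)]) cs
                | none => pvRleF [(d, 1)] cs) = _
          rw [hlast]
          simp
        rw [hstep]
        have h1' : ∀ p ∈ ds ++ [(d, k + 1)], 1 ≤ p.2 := by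
          intro p hp
          rcases List.mem_append.mp hp with h | h
          · exact h1 p (List.mem_append.mpr (Or.inl h))
          · simp at h; subst h; simp
        have h2' : List.IsChain (fun p q : Char × Nat => p.1 ≠ q.1) (ds ++ [(d, k + 1)]) := by
          obtain ⟨ha, _, hj⟩ := List.isChain_append.mp h2
          refine List.isChain_append.mpr ⟨ha, by simp, ?_⟩
          intro x hx y hy
          simp at hy
          subst hy
          have := hj x hx (d, k) (by simp)
          simpa using this
        obtain ⟨g1, g2, g3⟩ := ih _ h1' h2'
        refine ⟨g1, g2, ?_⟩
        rw [g3]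
        simp only [pvExpand_append, pvExpand_cons, pvExpand_nil, pvEp,
          List.replicate_succ', List.append_assoc, List.append_nil]
        simp
      · have hstep : pvRleF (ds ++ [(d, k)]) (c :: cs)
            = pvRleF ((ds ++ [(d, k)]) ++ [(c, 1)]) cs := by
          show (match (ds ++ [(d, k)]).getLast? with
                | some (e, m) =>
                  if e = c then pvRleF ((ds ++ [(d, k)]).dropLast ++ [(c, m + 1)]) cs
                  else pvRleF ((ds ++ [(d, k)]) ++ [(c, 1)]) cs
                | none => pvRleF [(c, 1)] cs) = _
          rw [hlast]
          simp [hdc]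
        rw [hstep]
        have h1' : ∀ p ∈ (ds ++ [(d, k)]) ++ [(c, 1)], 1 ≤ p.2 := by
          intro p hp
          rcases List.mem_append.mp hp with h | h
          · exact h1 p h
          · simp at h; subst h; simp
        have h2' : List.IsChain (fun p q : Char × Nat => p.1 ≠ q.1)
            ((ds ++ [(d, k)]) ++ [(c, 1)]) := by
          refine List.isChain_append.mpr ⟨h2, by simp, ?_⟩
          intro x hx y hy
          rw [hlast] at hx
          simp at hx hy
          subst hx
          subst hy
          exact hdc
        obtain ⟨g1, g2, g3⟩ := ih _ h1' h2'
        refine ⟨g1, g2, ?_⟩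
        rw [g3]
        simp [pvEp]

lemma rleF_eq_rle (l : List Char) : pvRleF [] l = pvRle l := by
  obtain ⟨g1, g2, g3⟩ := rleF_props l [] (by simp) (by simp)
  have : pvRle (pvExpand (pvRleF [] l)) = pvRleF [] l := rle_expand _ g1 g2
  rw [g3] at this
  simpa using this.symm

-- accumulator lemma for pvSuccsGo
lemma succsGo_append (out : List (List (Char × Nat))) (pre rest : List (Char × Nat)) :
    pvSuccsGo out pre rest = out ++ pvSuccsGo [] pre rest := by
  induction rest generalizing out pre with
  | nil => simp [pvSuccsGo]
  | cons p post ih =>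
    obtain ⟨ch, k⟩ := p
    simp only [pvSuccsGo]
    by_cases hk : 2 ≤ k
    · simp only [hk, if_true]
      rw [ih, ih ([] ++ _)]
      simp
    · simp only [hk, if_false]
      rw [ih, ih []]

-- pvBLoop is 'any' of (empty-or-f) over the successors computed by the same zipper
lemma bloop_succs (f : List (Char × Nat) → Bool) :
    ∀ (todo done : List (Char × Nat)),
      pvBLoop f done todo = (pvSuccsGo [] done todo).any (fun su => su.isEmpty || f su) := by
  intro todo
  induction todo with
  | nil => intro done; simp [pvBLoop, pvSuccsGo]
  | cons p rest ih =>
    obtain ⟨ch, k⟩ := p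
    intro done
    simp only [pvBLoop, pvSuccsGo]
    rw [succsGo_append, List.any_append, ih]
    by_cases hk : 2 ≤ k
    · simp [hk]
    · simp [hk]

lemma bgo_goodN : ∀ n T, pvBGo n T = goodN n T := by
  intro n
  induction n with
  | zero => intro T; rfl
  | succ n ih =>
    intro T
    show pvBLoop (pvBGo n) [] T = _
    rw [bloop_succs]
    show (pvSuccs T).any _ = (pvSuccs T).any _
    simp only [ih]

-- successors are strictly shorter token lists
lemma succs_shorter : ∀ (rest pre : List (Char × Nat)) (out : List (List (Char × Nat)))
    (su : List (Char × Nat)), su ∈ pvSuccsGo out pre rest →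
    su ∈ out ∨ su.length < pre.length + rest.length := by
  intro rest
  induction rest with
  | nil => intro pre out su h; exact Or.inl (by simpa [pvSuccsGo] using h)
  | cons p post ih =>
    obtain ⟨ch, k⟩ := p
    intro pre out su h
    simp only [pvSuccsGo] at h
    rcases ih (pre ++ [(ch, k)]) _ su h with h' | h'
    · by_cases hk : 2 ≤ k
      · simp only [hk, if_true, List.mem_append, List.mem_singleton] at h'
        rcases h' with h' | h'
        · exact Or.inl h'
        · right
          subst h'
          split
          · rename_i d k1 e k2 hp hq
            by_cases hde : d = e
            · have hpre1 : 1 ≤ pre.length := by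
                cases pre with
                | nil => simp at hp
                | cons _ _ => simp
              have hpost1 : 1 ≤ post.length := by
                cases post with
                | nil => simp at hq
                | cons _ _ => simp
              simp only [hde, if_true, List.length_append, List.length_cons,
                List.length_dropLast, List.length_tail]
              omega
            · rw [if_neg hde]
              simp
          · simp
      · simp only [hk, if_false] at h'
        exact Or.inl h'
    · right
      simp only [List.length_append, List.length_cons, List.length_nil] at h' ⊢
      omega

lemma goodN_mono : ∀ n m T, n ≤ m → goodN n T = true → goodN m T = true := by
  intro n
  induction n with
  | zero => intro m T _ h; simp [goodN] at h
  | succ n ih =>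
    intro m T hle h
    obtain ⟨m', rfl⟩ : ∃ m', m = m' + 1 := ⟨m - 1, by omega⟩
    simp only [goodN, List.any_eq_true] at h ⊢
    obtain ⟨su, hsu, hor⟩ := h
    refine ⟨su, hsu, ?_⟩
    rcases Bool.or_eq_true_iff.mp hor with h' | h'
    · simp [h']
    · have := ih m' su (by omega) h'
      simp [this]

lemma goodN_sat : ∀ n T, goodN n T = true → goodN T.length T = true := by
  intro n
  induction n with
  | zero => intro T h; simp [goodN] at h
  | succ n ih =>
    intro T h
    simp only [goodN, List.any_eq_true] at h
    obtain ⟨su, hsu, hor⟩ := h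
    have hlt : su.length < T.length := by
      rcases succs_shorter T [] [] su hsu with h' | h'
      · simp at h'
      · simpa using h'
    have hT1 : 1 ≤ T.length := by omega
    obtain ⟨m, hm⟩ : ∃ m, T.length = m + 1 := ⟨T.length - 1, by omega⟩
    rw [hm]
    simp only [goodN, List.any_eq_true]
    refine ⟨su, hsu, ?_⟩
    rcases Bool.or_eq_true_iff.mp hor with h' | h'
    · simp [h']
    · have h1 := ih su h'
      have h2 := goodN_mono su.length m su (by omega) h1
      simp [h2]

-- pvScan: none iff an empty successor occurs; otherwise membership bookkeeping
lemma scan_none (sucs : List (List (Char × Nat))) :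
    ∀ nxt seen, pvScan sucs nxt seen = none ↔ [] ∈ sucs := by
  induction sucs with
  | nil => intro nxt seen; simp [pvScan]
  | cons su rest ih =>
    intro nxt seen
    by_cases hsu : su = []
    · subst hsu; simp [pvScan]
    · have hmem : (([] : List (Char × Nat)) ∈ su :: rest) ↔ (([] : List (Char × Nat)) ∈ rest) := by
        simp only [List.mem_cons]
        constructor
        · rintro (h | h)
          · exact absurd h.symm hsu
          · exact h
        · exact Or.inr
      rw [hmem]
      show (if su = [] then none
            else if PySem.Set.contains seen su then pvScan rest nxt seen
            else pvScan rest (nxt ++ [su]) (PySem.Set.add seen su)) = none ↔ _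
      rw [if_neg hsu]
      by_cases hc : PySem.Set.contains seen su = true
      · rw [if_pos hc, ih]
      · rw [if_neg hc, ih]

lemma scan_some (sucs : List (List (Char × Nat))) :
    ∀ nxt seen nxt' seen',
      (∀ x, x ∈ nxt ↔ x ∈ seen) →
      pvScan sucs nxt seen = some (nxt', seen') →
      (∀ x, x ∈ nxt' ↔ x ∈ seen') ∧
      (∀ x, x ∈ nxt' ↔ (x ∈ nxt ∨ x ∈ sucs)) := by
  induction sucs with
  | nil =>
    intro nxt seen nxt' seen' hinv h
    simp only [pvScan, Option.some_inj, Prod.mk.injEq] at h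
    obtain ⟨rfl, rfl⟩ := h
    exact ⟨hinv, by simp⟩
  | cons su rest ih =>
    intro nxt seen nxt' seen' hinv h
    by_cases hsu : su = []
    · simp [pvScan, hsu] at h
    · simp only [pvScan, hsu, if_false] at h
      by_cases hc : PySem.Set.contains seen su
      · rw [if_pos hc] at h
        obtain ⟨hi, hm⟩ := ih nxt seen nxt' seen' hinv h
        refine ⟨hi, fun x => ?_⟩
        rw [hm x]
        have hsumem : su ∈ nxt := (hinv su).mpr ((PySem.Set.contains_iff _ _).mp hc)
        constructor
        · rintro (h' | h')
          · exact Or.inl h'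
          · simp [h']
        · rintro (h' | h')
          · exact Or.inl h'
          · simp at h'
            rcases h' with rfl | h'
            · exact Or.inl hsumem
            · exact Or.inr h'
      · rw [if_neg hc] at h
        have hinv' : ∀ x, x ∈ nxt ++ [su] ↔ x ∈ PySem.Set.add seen su := by
          intro x
          rw [PySem.Set.mem_add]
          simp [hinv x]
        obtain ⟨hi, hm⟩ := ih _ _ nxt' seen' hinv' h
        refine ⟨hi, fun x => ?_⟩
        rw [hm x]
        simp
        tauto

lemma level_none (fr : List (List (Char × Nat))) :
    ∀ nxt seen, (∀ x, x ∈ nxt ↔ x ∈ seen) →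
      (pvLevel fr nxt seen = none ↔ ∃ T ∈ fr, [] ∈ pvSuccs T) := by
  induction fr with
  | nil => intro nxt seen _; simp [pvLevel]
  | cons st rest ih =>
    intro nxt seen hinv
    simp only [pvLevel]
    cases hsc : pvScan (pvSuccs st) nxt seen with
    | none =>
      constructor
      · intro _; exact ⟨st, by simp, (scan_none _ _ _).mp hsc⟩
      · intro _; trivial
    | some p =>
      obtain ⟨nxt', seen'⟩ := p
      obtain ⟨hi, _⟩ := scan_some _ _ _ _ _ hinv hsc
      have hno : ¬ [] ∈ pvSuccs st := by
        intro hmem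
        rw [← scan_none _ nxt seen] at hmem
        rw [hsc] at hmem
        simp at hmem
      rw [ih nxt' seen' hi]
      simp [hno]

lemma level_some (fr : List (List (Char × Nat))) :
    ∀ nxt seen nxt' seen',
      (∀ x, x ∈ nxt ↔ x ∈ seen) →
      pvLevel fr nxt seen = some (nxt', seen') →
      (∀ x, x ∈ nxt' ↔ (x ∈ nxt ∨ ∃ T ∈ fr, x ∈ pvSuccs T)) := by
  induction fr with
  | nil =>
    intro nxt seen nxt' seen' hinv h
    simp only [pvLevel, Option.some_inj, Prod.mk.injEq] at h
    obtain ⟨rfl, rfl⟩ := h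
    simp
  | cons st rest ih =>
    intro nxt seen nxt' seen' hinv h
    simp only [pvLevel] at h
    cases hsc : pvScan (pvSuccs st) nxt seen with
    | none => rw [hsc] at h; simp at h
    | some p =>
      obtain ⟨nxt1, seen1⟩ := p
      rw [hsc] at h
      obtain ⟨hi, hm⟩ := scan_some _ _ _ _ _ hinv hsc
      have := ih nxt1 seen1 nxt' seen' hi h
      intro x
      rw [this x, hm x]
      constructor
      · rintro ((h' | h') | h')
        · exact Or.inl h'
        · exact Or.inr ⟨st, by simp, h'⟩
        · obtain ⟨T, hT, hx⟩ := h'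
          exact Or.inr ⟨T, by simp [hT], hx⟩
      · rintro (h' | ⟨T, hT, hx⟩)
        · exact Or.inl (Or.inl h')
        · rcases List.mem_cons.mp hT with rfl | hT'
          · exact Or.inl (Or.inr hx)
          · exact Or.inr ⟨T, hT', hx⟩

lemma bfs_goodN : ∀ n fr, pvBfs n fr = fr.any (fun T => goodN n T) := by
  intro n
  induction n with
  | zero =>
    intro fr
    cases fr with
    | nil => rfl
    | cons a l => simp [pvBfs, goodN]
  | succ n ih =>
    intro fr
    cases fr with
    | nil => rfl
    | cons a l =>
      show (match pvLevel (a :: l) [] PySem.Set.empty with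
            | none => true
            | some (nxt, _) => pvBfs n nxt) = _
      have hinv0 : ∀ x : List (Char × Nat), x ∈ ([] : List (List (Char × Nat))) ↔ x ∈ (PySem.Set.empty : PySem.Set (List (Char × Nat))) := by
        intro x; simp [PySem.Set.empty]
      cases hlv : pvLevel (a :: l) [] PySem.Set.empty with
      | none =>
        have hex := (level_none _ _ _ hinv0).mp hlv
        obtain ⟨T, hT, hmem⟩ := hex
        have : (a :: l).any (fun T => goodN (n + 1) T) = true := by
          rw [List.any_eq_true]
          refine ⟨T, hT, ?_⟩
          simp only [goodN, List.any_eq_true]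
          exact ⟨[], hmem, by simp⟩
        rw [this]
      | some p =>
        obtain ⟨nxt, seen⟩ := p
        have hmem := level_some _ _ _ nxt seen hinv0 hlv
        have hnoemp : ¬ ∃ T ∈ (a :: l), [] ∈ pvSuccs T := by
          intro hex
          have := (level_none (a :: l) [] PySem.Set.empty hinv0).mpr hex
          rw [hlv] at this
          simp at this
        show pvBfs n nxt = _
        rw [ih nxt]
        apply Bool.eq_iff_iff.mpr
        simp only [List.any_eq_true]
        constructor
        · rintro ⟨su, hsu, hg⟩
          have : su ∈ nxt := hsu
          rcases (hmem su).mp this with h' | ⟨T, hT, hx⟩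
          · simp at h'
          · refine ⟨T, hT, ?_⟩
            simp only [goodN, List.any_eq_true]
            refine ⟨su, hx, ?_⟩
            simp [hg]
        · rintro ⟨T, hT, hg⟩
          simp only [goodN, List.any_eq_true] at hg
          obtain ⟨su, hsu, hor⟩ := hg
          have hsune : su ≠ [] := by
            intro h'
            exact hnoemp ⟨T, hT, h' ▸ hsu⟩
          have hgood : goodN n su = true := by
            rcases Bool.or_eq_true_iff.mp hor with h' | h'
            · exact absurd (List.isEmpty_iff.mp h') hsune
            · exact h'
          refine ⟨su, ?_, hgood⟩
          exact (hmem su).mpr (Or.inr ⟨T, hT, hsu⟩)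

-- token count is at most the character count
lemma length_le_expand : ∀ ps : List (Char × Nat), (∀ p ∈ ps, 1 ≤ p.2) →
    ps.length ≤ (pvExpand ps).length := by
  intro ps
  induction ps with
  | nil => intro _; simp
  | cons p rest ih =>
    intro h
    have h1 : 1 ≤ p.2 := h p (by simp)
    have h2 := ih (fun q hq => h q (by simp [hq]))
    simp only [pvExpand_cons, List.length_cons, List.length_append, List.length_replicate]
    omega

-- ===== VERDICT (by name: the statement is the Claim_ definition above) =====
theorem is_string_reducible_spec : Claim_equal_is_string_reducible := by
  intro source _
  show is_string_reducible source = is_string_reducible_alt source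
  show pvAGo source.toList.length source.toList
      = pvBfs (source.toList.length + 1) [pvRleF [] source.toList]
  obtain ⟨_, h2, _, h4⟩ := rle_props source.toList
  have hlen : (pvRle source.toList).length ≤ source.toList.length := by
    have := length_le_expand (pvRle source.toList) h2
    rwa [h4] at this
  rw [go_eq _ _ le_rfl, bgo_goodN, rleF_eq_rle, bfs_goodN]
  simp only [List.any_cons, List.any_nil, Bool.or_false]
  apply Bool.eq_iff_iff.mpr
  constructor
  · intro h
    exact goodN_mono _ _ _ (Nat.le_succ _) h
  · intro h
    have hs := goodN_sat _ _ h
    exact goodN_mono _ _ _ hlen hs
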